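-- pv_equiv track=rewrite | github.com/Bastion-RND/Robo_Kernel | MicroPython/RP2040 example/RoboLib.py | mediana_filter
-- ===== SOURCE A (Python) =====
-- def mediana_filter(data):
--     result = []
--     if data is not None:
--         for i in range(len(data[0])):
--             mediana = [d[i] for d in data]
--             mediana.sort()
--             result.append(mediana[len(data)//2])
--     return result
-- ===== SOURCE B (Python) =====
-- def _select(xs, k):
--     # iterative quickselect: k-th smallest of xs (0-based), requires 0 <= k < len(xs)
--     while True:
--         p = xs[len(xs) // 2]
--         lt = [x for x in xs if x < p]
--         if k < len(lt):
--             xs = lt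
--             continue
--         gt = [x for x in xs if x > p]
--         nle = len(xs) - len(gt)  # count of elements <= p
--         if k < nle:
--             return p
--         k -= nle
--         xs = gt
--
--
-- def mediana_filter(data):
--     if data is None:
--         return []
--     k = len(data) // 2
--     return [_select([row[i] for row in data], k) for i in range(len(data[0]))]
-- ===== Notes on version B (the rewrite author's own statement) =====
-- stated objective: alternative
-- what changed: Replaces the full sort of each column by an iterative quickselect (three-way partition around the middle element) that extracts only the single middle-rank element.
import Mathlib
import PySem

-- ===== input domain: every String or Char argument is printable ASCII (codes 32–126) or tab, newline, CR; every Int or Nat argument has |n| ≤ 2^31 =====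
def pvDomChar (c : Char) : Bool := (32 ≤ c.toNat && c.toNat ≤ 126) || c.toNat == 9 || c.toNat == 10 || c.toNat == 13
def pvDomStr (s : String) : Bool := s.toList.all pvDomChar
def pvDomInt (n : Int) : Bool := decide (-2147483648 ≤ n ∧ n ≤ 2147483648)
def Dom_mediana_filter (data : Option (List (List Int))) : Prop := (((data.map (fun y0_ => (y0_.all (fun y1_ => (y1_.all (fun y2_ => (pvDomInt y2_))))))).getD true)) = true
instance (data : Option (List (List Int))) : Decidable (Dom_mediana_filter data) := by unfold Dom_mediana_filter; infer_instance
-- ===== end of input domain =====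

-- B replaces the per-column full sort by an iterative quickselect for the single middle-rank
-- element (objective: alternative algorithm, similar cost in practice).

-- ===== PORT A =====
def mediana_filter (data : Option (List (List Int))) : List Int :=
  match data with
  | none => []
  | some rows =>
    -- for i in range(len(data[0])): mediana = [d[i] for d in data]; mediana.sort(); result.append(mediana[len(data)//2])
    (PySem.List.pyRange 0 (((PySem.List.pyGet? rows 0).getD []).length : Int) 1).foldl
      (fun result i =>
        result ++ [(PySem.List.pyGet?
          (PySem.List.sorted (rows.map (fun d => (PySem.List.pyGet? d i).getD 0)) (fun v => v) false)
          (PySem.Int.floordiv (rows.length : Int) 2)).getD 0]) []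

-- ===== PORT B =====
-- iterative quickselect from Source B (`_select`), written as the equivalent structural recursion;
-- xs[len(xs)//2] for nonempty xs is ported as a checked getElem (index is nonnegative and in range)
def pySelect : List Int → Nat → Int
  | [], _ => 0   -- unreachable guard: _select is only called with 0 ≤ k < len(xs)
  | x :: xs', k =>
    let p := (x :: xs')[(x :: xs').length / 2]'(Nat.div_lt_self (Nat.succ_pos _) one_lt_two)
    let lt := (x :: xs').filter (fun y => y < p)
    if k < lt.length then pySelect lt k
    else
      let gt := (x :: xs').filter (fun y => p < y)
      let nle := (x :: xs').length - gt.length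
      if k < nle then p else pySelect gt (k - nle)
termination_by xs _ => xs.length
decreasing_by
  · exact List.length_filter_lt_length_iff_exists.2
      ⟨(x :: xs')[(x :: xs').length / 2]'(Nat.div_lt_self (Nat.succ_pos _) one_lt_two),
        List.getElem_mem _, by simp⟩
  · exact List.length_filter_lt_length_iff_exists.2
      ⟨(x :: xs')[(x :: xs').length / 2]'(Nat.div_lt_self (Nat.succ_pos _) one_lt_two),
        List.getElem_mem _, by simp⟩

def mediana_filter_alt (data : Option (List (List Int))) : List Int :=
  match data with
  | none => []
  | some rows =>
    (List.range ((PySem.List.pyGet? rows 0).getD []).length).map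
      (fun (i : Nat) => pySelect (rows.map (fun row => (PySem.List.pyGet? row (i : Int)).getD 0))
        (rows.length / 2))

-- ===== PRECONDITION & SPEC =====
-- Pre_ excludes exactly the inputs on which Python A raises IndexError: an empty matrix
-- (data[0] fails) or a row shorter than the first row (d[i] fails).
def Pre_mediana_filter (data : Option (List (List Int))) : Prop :=
  data.all (fun rows =>
    !rows.isEmpty && rows.all (fun row => (rows.headD []).length ≤ row.length)) = true
instance (data : Option (List (List Int))) : Decidable (Pre_mediana_filter data) := by
  unfold Pre_mediana_filter; infer_instance

def pvWitness_mediana_filter : Option (List (List Int)) := some [[1, 2], [3, 4], [5, 6]]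

def Spec_mediana_filter (data : Option (List (List Int))) (out : List Int) : Prop := out = mediana_filter_alt data
instance (data : Option (List (List Int))) (out : List Int) : Decidable (Spec_mediana_filter data out) := by unfold Spec_mediana_filter; infer_instance

-- ===== CLAIM (what is proved, stated in full; the proofs are below) =====
def Claim_equal_mediana_filter : Prop := ∀ (data : Option (List (List Int))), Dom_mediana_filter data → Pre_mediana_filter data → Spec_mediana_filter data (mediana_filter data)

-- ===== LEMMAS AND PROOFS =====

-- three-way partition of a list around a pivot is a permutation of the list
lemma part3_perm (xs : List Int) (p : Int) :
    (xs.filter (fun y => y < p) ++ xs.filter (fun y => y == p) ++ xs.filter (fun y => p < y)).Perm xs := by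
  rw [List.perm_iff_count]
  intro a
  simp only [List.count_append]
  rcases lt_trichotomy a p with h | h | h
  · rw [List.count_filter (by simp [h]),
      show List.count a (List.filter (fun y => y == p) xs) = 0 from
        List.count_eq_zero.2 (fun hm => by have := (List.mem_filter.1 hm).2; simp at this; omega),
      show List.count a (List.filter (fun y => p < y) xs) = 0 from
        List.count_eq_zero.2 (fun hm => by have := (List.mem_filter.1 hm).2; simp at this; omega)]
    omega
  · rw [show List.count a (List.filter (fun y => y < p) xs) = 0 from
        List.count_eq_zero.2 (fun hm => by have := (List.mem_filter.1 hm).2; simp at this; omega),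
      List.count_filter (by simp [h]),
      show List.count a (List.filter (fun y => p < y) xs) = 0 from
        List.count_eq_zero.2 (fun hm => by have := (List.mem_filter.1 hm).2; simp at this; omega)]
    omega
  · rw [show List.count a (List.filter (fun y => y < p) xs) = 0 from
        List.count_eq_zero.2 (fun hm => by have := (List.mem_filter.1 hm).2; simp at this; omega),
      show List.count a (List.filter (fun y => y == p) xs) = 0 from
        List.count_eq_zero.2 (fun hm => by have := (List.mem_filter.1 hm).2; simp at this; omega),
      List.count_filter (by simp [h])]
    omega

-- the sorted list decomposes as sorted-below ++ equal ++ sorted-above around any pivot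
lemma sorted_decomp (xs : List Int) (p : Int) :
    PySem.List.sorted xs (fun v => v) false =
      PySem.List.sorted (xs.filter (fun y => y < p)) (fun v => v) false
        ++ xs.filter (fun y => y == p)
        ++ PySem.List.sorted (xs.filter (fun y => p < y)) (fun v => v) false := by
  have hA : (PySem.List.sorted (xs.filter (fun y => y < p)) (fun v => v) false).Perm
      (xs.filter (fun y => y < p)) := PySem.List.sorted_perm ..
  have hB : (PySem.List.sorted (xs.filter (fun y => p < y)) (fun v => v) false).Perm
      (xs.filter (fun y => p < y)) := PySem.List.sorted_perm ..
  have hperm : (PySem.List.sorted xs (fun v => v) false).Perm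
      (PySem.List.sorted (xs.filter (fun y => y < p)) (fun v => v) false
        ++ xs.filter (fun y => y == p)
        ++ PySem.List.sorted (xs.filter (fun y => p < y)) (fun v => v) false) :=
    ((PySem.List.sorted_perm ..).trans (part3_perm xs p).symm).trans
      (((hA.symm.append (List.Perm.refl _)).append hB.symm))
  have hmemlt : ∀ a ∈ PySem.List.sorted (xs.filter (fun y => y < p)) (fun v => v) false, a < p := by
    intro a ha
    have h1 := (PySem.List.mem_sorted ..).1 ha
    simpa using (List.mem_filter.1 h1).2
  have hmemeq : ∀ a ∈ xs.filter (fun y => y == p), a = p := by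
    intro a ha
    simpa using (List.mem_filter.1 ha).2
  have hmemgt : ∀ a ∈ PySem.List.sorted (xs.filter (fun y => p < y)) (fun v => v) false, p < a := by
    intro a ha
    have h1 := (PySem.List.mem_sorted ..).1 ha
    simpa using (List.mem_filter.1 h1).2
  refine List.Perm.eq_of_pairwise (fun a b _ _ h1 h2 => le_antisymm h1 h2)
    (by simpa using PySem.List.sorted_pairwise xs (fun v => v)) ?_ hperm
  rw [List.pairwise_append, List.pairwise_append]
  refine ⟨⟨by simpa using PySem.List.sorted_pairwise _ (fun v => v), ?_, ?_⟩,
    by simpa using PySem.List.sorted_pairwise _ (fun v => v), ?_⟩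
  · exact List.pairwise_of_forall_mem_list (fun a ha b hb => by rw [hmemeq a ha, hmemeq b hb])
  · intro a ha b hb; rw [hmemeq b hb]; exact le_of_lt (hmemlt a ha)
  · intro a ha b hb
    rcases List.mem_append.1 ha with h | h
    · exact le_of_lt ((hmemlt a h).trans (hmemgt b hb))
    · rw [hmemeq a h]; exact le_of_lt (hmemgt b hb)

-- the three-way partition splits the length
lemma part3_len (xs : List Int) (p : Int) :
    (xs.filter (fun y => y < p)).length + (xs.filter (fun y => y == p)).length
      + (xs.filter (fun y => p < y)).length = xs.length := by
  have h := (part3_perm xs p).length_eq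
  simp only [List.length_append] at h
  omega

-- middle-rank lookup in the sorted list, by cases against the partition around p
lemma sel_lt (xs : List Int) (p : Int) (k : Nat)
    (h1 : k < (xs.filter (fun y => y < p)).length) :
    (PySem.List.sorted xs (fun v => v) false).getD k 0
      = (PySem.List.sorted (xs.filter (fun y => y < p)) (fun v => v) false).getD k 0 := by
  have hslt : (PySem.List.sorted (xs.filter (fun y => y < p)) (fun v => v) false).length
      = (xs.filter (fun y => y < p)).length := (PySem.List.sorted_perm ..).length_eq
  rw [sorted_decomp xs p,
    List.getD_append _ _ _ _ (by rw [List.length_append, hslt]; omega),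
    List.getD_append _ _ _ _ (by rw [hslt]; omega)]

lemma sel_eq (xs : List Int) (p : Int) (k : Nat)
    (h1 : ¬ k < (xs.filter (fun y => y < p)).length)
    (h2 : k < xs.length - (xs.filter (fun y => p < y)).length) :
    (PySem.List.sorted xs (fun v => v) false).getD k 0 = p := by
  have hslt : (PySem.List.sorted (xs.filter (fun y => y < p)) (fun v => v) false).length
      = (xs.filter (fun y => y < p)).length := (PySem.List.sorted_perm ..).length_eq
  have hlen := part3_len xs p
  rw [sorted_decomp xs p,
    List.getD_append _ _ _ _ (by rw [List.length_append, hslt]; omega),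
    List.getD_append_right _ _ _ _ (by rw [hslt]; omega)]
  have hidx : k - (PySem.List.sorted (xs.filter (fun y => y < p)) (fun v => v) false).length
      < (xs.filter (fun y => y == p)).length := by rw [hslt]; omega
  rw [List.getD_eq_getElem _ _ hidx]
  simpa using (List.mem_filter.1 (List.getElem_mem hidx)).2

lemma sel_gt (xs : List Int) (p : Int) (k : Nat)
    (h2 : ¬ k < xs.length - (xs.filter (fun y => p < y)).length) :
    (PySem.List.sorted xs (fun v => v) false).getD k 0
      = (PySem.List.sorted (xs.filter (fun y => p < y)) (fun v => v) false).getD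
          (k - (xs.length - (xs.filter (fun y => p < y)).length)) 0 := by
  have hslt : (PySem.List.sorted (xs.filter (fun y => y < p)) (fun v => v) false).length
      = (xs.filter (fun y => y < p)).length := (PySem.List.sorted_perm ..).length_eq
  have hlen := part3_len xs p
  rw [sorted_decomp xs p,
    List.getD_append_right _ _ _ _ (by rw [List.length_append, hslt]; omega)]
  congr 1
  rw [List.length_append, hslt]
  omega

-- quickselect computes the k-th element of the sorted list
lemma pySelect_correct : ∀ (n : Nat) (xs : List Int) (k : Nat), xs.length ≤ n → k < xs.length →
    pySelect xs k = (PySem.List.sorted xs (fun v => v) false).getD k 0 := by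
  intro n
  induction n with
  | zero => intro xs k h hk; omega
  | succ n ih =>
    intro xs k h hk
    match xs with
    | [] => simp at hk
    | x :: xs' =>
      have hpmem : (x :: xs')[(x :: xs').length / 2]'(Nat.div_lt_self (Nat.succ_pos _) one_lt_two)
          ∈ (x :: xs') := List.getElem_mem _
      have hltlen : ((x :: xs').filter (fun y =>
          y < (x :: xs')[(x :: xs').length / 2]'(Nat.div_lt_self (Nat.succ_pos _) one_lt_two))).length
          < (x :: xs').length :=
        List.length_filter_lt_length_iff_exists.2 ⟨_, hpmem, by simp⟩
      have hgtlen : ((x :: xs').filter (fun y =>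
          (x :: xs')[(x :: xs').length / 2]'(Nat.div_lt_self (Nat.succ_pos _) one_lt_two) < y)).length
          < (x :: xs').length :=
        List.length_filter_lt_length_iff_exists.2 ⟨_, hpmem, by simp⟩
      have hlen := part3_len (x :: xs')
        ((x :: xs')[(x :: xs').length / 2]'(Nat.div_lt_self (Nat.succ_pos _) one_lt_two))
      simp only [pySelect]
      split_ifs with h1 h2
      · rw [ih _ _ (by omega) h1]
        exact (sel_lt _ _ _ h1).symm
      · exact (sel_eq _ _ _ h1 h2).symm
      · rw [ih _ _ (by omega) (by omega)]
        exact (sel_gt _ _ _ h2).symm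

-- ===== VERDICT (by name: the statement is the Claim_ definition above) =====
theorem mediana_filter_spec : Claim_equal_mediana_filter := by
  intro data _hdom hpre
  unfold Spec_mediana_filter mediana_filter mediana_filter_alt
  match data with
  | none => rfl
  | some rows =>
    simp only
    unfold Pre_mediana_filter at hpre
    simp only [Option.all_some, Bool.and_eq_true, Bool.not_eq_eq_eq_not, Bool.not_true,
      List.isEmpty_eq_false_iff] at hpre
    have hrows : 0 < rows.length := List.length_pos_iff.2 (by
      simpa using hpre.1)
    rw [PySem.List.foldl_append_singleton_eq_map, List.nil_append,
      PySem.List.pyRange_zero_nat, List.map_map]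
    refine List.map_congr_left (fun i _ => ?_)
    simp only [Function.comp_apply]
    have hklt : rows.length / 2 < rows.length := Nat.div_lt_self hrows one_lt_two
    rw [pySelect_correct rows.length _ _ (by simp) (by simp; omega)]
    have hfd : PySem.Int.floordiv (rows.length : Int) 2 = ((rows.length / 2 : Nat) : Int) := by
      exact_mod_cast PySem.Int.floordiv_natCast rows.length 2
    rw [hfd, PySem.List.pyGet?_natCast, List.getD_eq_getElem?_getD]
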